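-- pv_equiv track=rewrite | github.com/Prasang-Biyani/Data-Science | Data_Structures/binary_search.py | bs_contains
-- ===== SOURCE A (Python) =====
-- from typing import List
--
-- def bs_contains(ordered: List[int], target: int):
--     """Binary search algorithm."""
--     low = 0
--     high = len(ordered) - 1
--     while low <= high:
--         mid = int((low + high) / 2)
--         if ordered[mid] == target:
--             # if element already exists, then you want to insert the element next to the element
--             return mid
--         elif ordered[mid] > target:
--             high = mid - 1
--         else:
--             low = mid + 1
--     return -(low + 1)
-- ===== SOURCE B (Python) =====
-- def bs_contains(ordered, target):
--     """Binary search, written as divide-and-conquer recursion over index subranges."""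
--     def bs(low, high):
--         if low > high:
--             return -(low + 1)
--         mid = (low + high) // 2
--         v = ordered[mid]
--         if v == target:
--             return mid
--         if v > target:
--             return bs(low, mid - 1)
--         return bs(mid + 1, high)
--     return bs(0, len(ordered) - 1)
-- ===== Notes on version B (the rewrite author's own statement) =====
-- stated objective: alternative
-- what changed: The iterative while-loop with mutable low/high state is re-decomposed as a recursive divide-and-conquer helper over shrinking index subranges (base case first, returning -(low+1)), with the midpoint computed by integer floor division instead of float division plus int().
import Mathlib
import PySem

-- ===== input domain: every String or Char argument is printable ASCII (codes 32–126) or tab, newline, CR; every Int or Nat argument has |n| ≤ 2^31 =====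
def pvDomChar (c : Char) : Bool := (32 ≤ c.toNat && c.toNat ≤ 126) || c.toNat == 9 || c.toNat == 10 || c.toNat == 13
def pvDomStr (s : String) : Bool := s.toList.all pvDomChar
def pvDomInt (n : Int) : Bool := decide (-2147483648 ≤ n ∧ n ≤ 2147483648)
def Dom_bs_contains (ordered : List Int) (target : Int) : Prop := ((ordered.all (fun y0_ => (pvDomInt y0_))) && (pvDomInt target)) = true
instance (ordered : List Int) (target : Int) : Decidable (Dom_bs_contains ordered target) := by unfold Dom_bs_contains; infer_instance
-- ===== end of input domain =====

-- B re-decomposes A's iterative while-loop as a recursive divide-and-conquer helper over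
-- index subranges (same values returned; objective: alternative decomposition, same cost).


-- midpoint bounds for truncating division, used for termination of the A-side loop
theorem pvTdivTwoMid (lo hi : Int) (h : lo ≤ hi) :
    lo ≤ (lo + hi).tdiv 2 ∧ (lo + hi).tdiv 2 ≤ hi := by
  by_cases h0 : 0 ≤ lo + hi
  · rw [Int.tdiv_eq_ediv_of_nonneg h0]
    have h1 := Int.mul_ediv_add_emod (lo + hi) 2
    have h2 := Int.emod_nonneg (lo + hi) (by norm_num : (2:Int) ≠ 0)
    have h3 := Int.emod_lt_of_pos (lo + hi) (by norm_num : (0:Int) < 2)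
    omega
  · have e : (lo + hi).tdiv 2 = -((-(lo + hi)).tdiv 2) := by rw [Int.neg_tdiv]; omega
    rw [e, Int.tdiv_eq_ediv_of_nonneg (by omega)]
    have h1 := Int.mul_ediv_add_emod (-(lo + hi)) 2
    have h2 := Int.emod_nonneg (-(lo + hi)) (by norm_num : (2:Int) ≠ 0)
    have h3 := Int.emod_lt_of_pos (-(lo + hi)) (by norm_num : (0:Int) < 2)
    omega

-- ===== PORT A =====
-- A's while-loop, as structural recursion over the loop state (low, high).
-- mid = int((low+high)/2): float division then int() truncation; PySem.Int.truncdiv is exactly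
-- int(a / b) (the involved values stay far below 2^53, where float division is exact).
-- ordered[mid] is in range on every state A's loop reaches, so pyGetD's default is never read.
def bsWhile (ordered : List Int) (target : Int) (low high : Int) : Int :=
  if low ≤ high then
    let mid := PySem.Int.truncdiv (low + high) 2
    if PySem.List.pyGetD ordered mid 0 = target then mid
    else if PySem.List.pyGetD ordered mid 0 > target then bsWhile ordered target low (mid - 1)
    else bsWhile ordered target (mid + 1) high
  else -(low + 1)
termination_by (high + 1 - low).toNat
decreasing_by
  · have := pvTdivTwoMid low high (by assumption)
    simp only [PySem.Int.truncdiv] at *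
    omega
  · have := pvTdivTwoMid low high (by assumption)
    simp only [PySem.Int.truncdiv] at *
    omega

def bs_contains (ordered : List Int) (target : Int) : Int :=
  bsWhile ordered target 0 ((ordered.length : Int) - 1)

-- ===== PORT B =====
-- B's recursive helper bs(low, high): base case first, then three-way branch on ordered[mid].
def bsRec (ordered : List Int) (target : Int) (low high : Int) : Int :=
  if low > high then -(low + 1)
  else
    let mid := PySem.Int.floordiv (low + high) 2
    let v := PySem.List.pyGetD ordered mid 0
    if v = target then mid
    else if v > target then bsRec ordered target low (mid - 1)
    else bsRec ordered target (mid + 1) high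
termination_by (high + 1 - low).toNat
decreasing_by
  · have := PySem.Int.floordiv_two_mid_bounds (show low ≤ high by omega)
    omega
  · have := PySem.Int.floordiv_two_mid_bounds (show low ≤ high by omega)
    omega

def bs_contains_alt (ordered : List Int) (target : Int) : Int :=
  bsRec ordered target 0 ((ordered.length : Int) - 1)

-- ===== PRECONDITION & SPEC =====
def Spec_bs_contains (ordered : List Int) (target : Int) (out : Int) : Prop := out = bs_contains_alt ordered target
instance (ordered : List Int) (target : Int) (out : Int) : Decidable (Spec_bs_contains ordered target out) := by unfold Spec_bs_contains; infer_instance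

-- ===== CLAIM (what is proved, stated in full; the proofs are below) =====
def Claim_equal_bs_contains : Prop := ∀ (ordered : List Int) (target : Int), Dom_bs_contains ordered target → Spec_bs_contains ordered target (bs_contains ordered target)

-- ===== LEMMAS AND PROOFS =====

-- On states with 0 ≤ low (all states either program reaches from the entry call), the
-- truncating midpoint of A equals the flooring midpoint of B, and the recursions coincide.
theorem bsWhile_eq_bsRec (ordered : List Int) (target : Int) :
    ∀ (n : Nat) (low high : Int), (high + 1 - low).toNat ≤ n → 0 ≤ low →
      bsWhile ordered target low high = bsRec ordered target low high := by
  intro n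
  induction n with
  | zero =>
    intro low high hn h0
    rw [bsWhile, bsRec]
    rw [if_neg (show ¬ low ≤ high from by omega)]
    rw [if_pos (show low > high from by omega)]
  | succ n ih =>
    intro low high hn h0
    by_cases h : low ≤ high
    · have hm := PySem.Int.floordiv_two_mid_bounds h
      have emid : PySem.Int.truncdiv (low + high) 2 = PySem.Int.floordiv (low + high) 2 := by
        rw [PySem.Int.floordiv_eq_ediv_of_pos (by norm_num : (0:Int) < 2)]
        exact Int.tdiv_eq_ediv_of_nonneg (by omega)
      rw [bsWhile, bsRec]
      rw [if_pos h]
      rw [if_neg (not_lt.mpr h)]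
      simp only [emid]
      by_cases h1 : PySem.List.pyGetD ordered (PySem.Int.floordiv (low + high) 2) 0 = target
      · rw [if_pos h1, if_pos h1]
      · rw [if_neg h1, if_neg h1]
        by_cases h2 : PySem.List.pyGetD ordered (PySem.Int.floordiv (low + high) 2) 0 > target
        · rw [if_pos h2, if_pos h2]
          exact ih low (PySem.Int.floordiv (low + high) 2 - 1) (by omega) h0
        · rw [if_neg h2, if_neg h2]
          exact ih (PySem.Int.floordiv (low + high) 2 + 1) high (by omega) (by omega)
    · rw [bsWhile, bsRec]
      rw [if_neg h]
      rw [if_pos (show low > high from by omega)]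

-- ===== VERDICT (by name: the statement is the Claim_ definition above) =====
theorem bs_contains_spec : Claim_equal_bs_contains := by
  intro ordered target _
  unfold Spec_bs_contains bs_contains bs_contains_alt
  exact bsWhile_eq_bsRec ordered target (((ordered.length : Int) - 1 + 1 - 0).toNat) 0 _
    (le_refl _) (le_refl 0)
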